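-- pv_equiv track=rewrite | github.com/edtireli/p-brain-platform | backend/supabase_worker.py | _job_ready
-- ===== SOURCE A (Python) =====
-- from typing import Any, Dict, Optional
--
-- _STAGES = (
-- 	"import",
-- 	"t1_fit",
-- 	"input_functions",
-- 	"time_shift",
-- 	"segmentation",
-- 	"tissue_ctc",
-- 	"modelling",
-- 	"diffusion",
-- 	"montage_qc",
-- )
--
-- def _stage_index(stage_id: str) -> int:
-- 	try:
-- 		return list(_STAGES).index(stage_id)
-- 	except ValueError:
-- 		return 999
--
-- def _is_stage_done(status: Any) -> bool:
-- 	return str(status or "").strip().lower() == "done"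
--
-- def _is_stage_failed(status: Any) -> bool:
-- 	return str(status or "").strip().lower() == "failed"
--
-- def _job_ready(stage_id: str, stage_statuses: Dict[str, Any]) -> bool:
-- 	# Enforce a simple linear dependency chain based on _STAGES ordering.
-- 	idx = _stage_index(stage_id)
-- 	if idx <= 0:
-- 		return True
-- 	# If any prior stage failed, don't run downstream stages.
-- 	for s in _STAGES[:idx]:
-- 		if _is_stage_failed(stage_statuses.get(s)):
-- 			return False
-- 	# Require all prior stages done.
-- 	return all(_is_stage_done(stage_statuses.get(s)) for s in _STAGES[:idx])
-- ===== SOURCE B (Python) =====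
-- from typing import Any, Dict
--
-- _STAGES = (
-- 	"import",
-- 	"t1_fit",
-- 	"input_functions",
-- 	"time_shift",
-- 	"segmentation",
-- 	"tissue_ctc",
-- 	"modelling",
-- 	"diffusion",
-- 	"montage_qc",
-- )
--
-- def _is_stage_done(status: Any) -> bool:
-- 	return str(status or "").strip().lower() == "done"
--
-- def _job_ready(stage_id: str, stage_statuses: Dict[str, Any]) -> bool:
-- 	# Single pass down the chain: ready iff every stage strictly before
-- 	# stage_id is done (a prior "failed" stage is in particular not done).
-- 	for s in _STAGES:
-- 		if s == stage_id:
-- 			return True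
-- 		if not _is_stage_done(stage_statuses.get(s)):
-- 			return False
-- 	return True
-- ===== Notes on version B (the rewrite author's own statement) =====
-- stated objective: simpler
-- what changed: B replaces A's index computation, slice, and two separate scans (failed-scan then all-done scan) by one early-exit walk down the stage chain, using that a 'failed' status is in particular not 'done'.
import Mathlib
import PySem

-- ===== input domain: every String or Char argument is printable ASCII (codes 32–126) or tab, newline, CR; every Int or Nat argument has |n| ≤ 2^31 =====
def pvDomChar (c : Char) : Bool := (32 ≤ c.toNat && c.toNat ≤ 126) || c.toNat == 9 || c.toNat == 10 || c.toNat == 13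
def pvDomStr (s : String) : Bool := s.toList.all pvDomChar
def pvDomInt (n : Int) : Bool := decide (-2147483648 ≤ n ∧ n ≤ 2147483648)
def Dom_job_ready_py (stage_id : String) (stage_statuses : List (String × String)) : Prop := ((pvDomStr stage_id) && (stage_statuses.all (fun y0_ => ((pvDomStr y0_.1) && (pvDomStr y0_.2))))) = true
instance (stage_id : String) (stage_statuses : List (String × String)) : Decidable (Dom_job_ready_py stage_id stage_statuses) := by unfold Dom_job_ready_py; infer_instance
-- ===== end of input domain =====

-- B replaces A's index/slice + two scans (failed-scan, then all-done scan) by one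
-- early-exit walk down the stage chain; objective: simpler, same behaviour.

-- ===== PORT A =====
-- _STAGES
def pyStages : List String :=
  ["import", "t1_fit", "input_functions", "time_shift", "segmentation",
   "tissue_ctc", "modelling", "diffusion", "montage_qc"]

-- _stage_index: list(_STAGES).index(stage_id), ValueError -> 999
def stage_index_py (stage_id : String) : Int :=
  match PySem.List.index? pyStages stage_id with
  | some i => (i : Int)
  | none => 999

-- stage_statuses.get(s): on this module's dicts values are strings; `status or ""`
-- turns a missing key (None) or an empty string into "" — i.e. get with default "".
def getStatus (stage_statuses : List (String × String)) (s : String) : String :=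
  (PySem.Dict.mk stage_statuses).getD s ""

-- _is_stage_done
def is_stage_done_py (status : String) : Bool :=
  PySem.Str.lower (PySem.Str.strip status) == "done"

-- _is_stage_failed
def is_stage_failed_py (status : String) : Bool :=
  PySem.Str.lower (PySem.Str.strip status) == "failed"

def job_ready_py (stage_id : String) (stage_statuses : List (String × String)) : Bool :=
  let idx := stage_index_py stage_id
  if idx ≤ 0 then true
  else
    -- for s in _STAGES[:idx]: if _is_stage_failed(...): return False
    let priors := PySem.List.slice pyStages (some 0) (some idx)
    if priors.any (fun s => is_stage_failed_py (getStatus stage_statuses s)) then false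
    -- return all(_is_stage_done(...) for s in _STAGES[:idx])
    else priors.all (fun s => is_stage_done_py (getStatus stage_statuses s))

-- ===== PORT B =====
-- the for-loop of Source B: walk the chain, stop at stage_id (True) or at a not-done stage (False)
def walkReady (stage_id : String) (stage_statuses : List (String × String)) : List String → Bool
  | [] => true
  | s :: rest =>
    if s == stage_id then true
    else if is_stage_done_py (getStatus stage_statuses s) then walkReady stage_id stage_statuses rest
    else false

def job_ready_py_alt (stage_id : String) (stage_statuses : List (String × String)) : Bool :=
  walkReady stage_id stage_statuses pyStages

-- ===== PRECONDITION & SPEC =====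
def Spec_job_ready_py (stage_id : String) (stage_statuses : List (String × String)) (out : Bool) : Prop := out = job_ready_py_alt stage_id stage_statuses
instance (stage_id : String) (stage_statuses : List (String × String)) (out : Bool) : Decidable (Spec_job_ready_py stage_id stage_statuses out) := by unfold Spec_job_ready_py; infer_instance

-- ===== CLAIM (what is proved, stated in full; the proofs are below) =====
def Claim_equal_job_ready_py : Prop := ∀ (stage_id : String) (stage_statuses : List (String × String)), Dom_job_ready_py stage_id stage_statuses → Spec_job_ready_py stage_id stage_statuses (job_ready_py stage_id stage_statuses)

-- ===== LEMMAS AND PROOFS =====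

-- a "failed" status is in particular not "done"
theorem failed_not_done (v : String) :
    is_stage_failed_py v = true → is_stage_done_py v = false := by
  simp only [is_stage_failed_py, is_stage_done_py, beq_iff_eq]
  intro h; simp [h]

-- A's failed-scan is redundant: any failed prior already falsifies the all-done scan
theorem ite_any_all (l : List String) (sts : List (String × String)) :
    (if l.any (fun s => is_stage_failed_py (getStatus sts s)) then false
     else l.all (fun s => is_stage_done_py (getStatus sts s)))
    = l.all (fun s => is_stage_done_py (getStatus sts s)) := by
  split_ifs with h
  · obtain ⟨s, hs, hf⟩ := List.any_eq_true.mp h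
    symm
    rw [List.all_eq_false]
    exact ⟨s, hs, by simp [failed_not_done _ hf]⟩
  · rfl

-- B's walk on a list missing stage_id is the all-done scan
theorem walk_not_mem (sid : String) (sts : List (String × String)) (l : List String)
    (h : sid ∉ l) : walkReady sid sts l = l.all (fun s => is_stage_done_py (getStatus sts s)) := by
  induction l with
  | nil => rfl
  | cons s rest ih =>
    have hs : (s == sid) = false := by
      simp only [beq_eq_false_iff_ne]; intro he; exact h (he ▸ List.mem_cons_self ..)
    have hrest : sid ∉ rest := fun hm => h (List.mem_cons_of_mem _ hm)
    cases hd : is_stage_done_py (getStatus sts s) <;>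
      simp [walkReady, hs, hd, ih hrest]

-- B's walk stops with True at stage_id, having checked exactly the priors
theorem walk_split (sid : String) (sts : List (String × String)) (l1 l2 : List String)
    (h : sid ∉ l1) :
    walkReady sid sts (l1 ++ sid :: l2) = l1.all (fun s => is_stage_done_py (getStatus sts s)) := by
  induction l1 with
  | nil => simp [walkReady]
  | cons s rest ih =>
    have hs : (s == sid) = false := by
      simp only [beq_eq_false_iff_ne]; intro he; exact h (he ▸ List.mem_cons_self ..)
    have hrest : sid ∉ rest := fun hm => h (List.mem_cons_of_mem _ hm)
    cases hd : is_stage_done_py (getStatus sts s) <;>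
      simp [walkReady, hs, hd, ih hrest]

-- A without its redundant failed-scan
theorem A_eq_all (sid : String) (sts : List (String × String)) :
    job_ready_py sid sts =
      (if stage_index_py sid ≤ 0 then true
       else (PySem.List.slice pyStages (some 0) (some (stage_index_py sid))).all
              (fun s => is_stage_done_py (getStatus sts s))) := by
  unfold job_ready_py
  by_cases h : stage_index_py sid ≤ 0
  · simp [h]
  · simp only [if_neg h]; exact ite_any_all _ _

-- ===== VERDICT (by name: the statement is the Claim_ definition above) =====
theorem job_ready_py_spec : Claim_equal_job_ready_py := by
  intro sid sts _
  unfold Spec_job_ready_py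
  by_cases hmem : sid ∈ pyStages
  · simp only [pyStages, List.mem_cons, List.not_mem_nil, or_false] at hmem
    rcases hmem with rfl | rfl | rfl | rfl | rfl | rfl | rfl | rfl | rfl
    · rw [A_eq_all, show stage_index_py "import" = 0 from by decide, if_pos (by decide)]
      simp [job_ready_py_alt, pyStages, walkReady]
    · rw [A_eq_all, show stage_index_py "t1_fit" = 1 from by decide,
          if_neg (by decide),
          show PySem.List.slice pyStages (some 0) (some 1) = ["import"] from by decide]
      unfold job_ready_py_alt
      rw [show pyStages = ["import"] ++ "t1_fit" :: ["input_functions", "time_shift", "segmentation", "tissue_ctc", "modelling", "diffusion", "montage_qc"] from rfl,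
          walk_split _ _ _ _ (by decide)]
    · rw [A_eq_all, show stage_index_py "input_functions" = 2 from by decide,
          if_neg (by decide),
          show PySem.List.slice pyStages (some 0) (some 2) = ["import", "t1_fit"] from by decide]
      unfold job_ready_py_alt
      rw [show pyStages = ["import", "t1_fit"] ++ "input_functions" :: ["time_shift", "segmentation", "tissue_ctc", "modelling", "diffusion", "montage_qc"] from rfl,
          walk_split _ _ _ _ (by decide)]
    · rw [A_eq_all, show stage_index_py "time_shift" = 3 from by decide,
          if_neg (by decide),
          show PySem.List.slice pyStages (some 0) (some 3) = ["import", "t1_fit", "input_functions"] from by decide]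
      unfold job_ready_py_alt
      rw [show pyStages = ["import", "t1_fit", "input_functions"] ++ "time_shift" :: ["segmentation", "tissue_ctc", "modelling", "diffusion", "montage_qc"] from rfl,
          walk_split _ _ _ _ (by decide)]
    · rw [A_eq_all, show stage_index_py "segmentation" = 4 from by decide,
          if_neg (by decide),
          show PySem.List.slice pyStages (some 0) (some 4) = ["import", "t1_fit", "input_functions", "time_shift"] from by decide]
      unfold job_ready_py_alt
      rw [show pyStages = ["import", "t1_fit", "input_functions", "time_shift"] ++ "segmentation" :: ["tissue_ctc", "modelling", "diffusion", "montage_qc"] from rfl,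
          walk_split _ _ _ _ (by decide)]
    · rw [A_eq_all, show stage_index_py "tissue_ctc" = 5 from by decide,
          if_neg (by decide),
          show PySem.List.slice pyStages (some 0) (some 5) = ["import", "t1_fit", "input_functions", "time_shift", "segmentation"] from by decide]
      unfold job_ready_py_alt
      rw [show pyStages = ["import", "t1_fit", "input_functions", "time_shift", "segmentation"] ++ "tissue_ctc" :: ["modelling", "diffusion", "montage_qc"] from rfl,
          walk_split _ _ _ _ (by decide)]
    · rw [A_eq_all, show stage_index_py "modelling" = 6 from by decide,
          if_neg (by decide),
          show PySem.List.slice pyStages (some 0) (some 6) = ["import", "t1_fit", "input_functions", "time_shift", "segmentation", "tissue_ctc"] from by decide]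
      unfold job_ready_py_alt
      rw [show pyStages = ["import", "t1_fit", "input_functions", "time_shift", "segmentation", "tissue_ctc"] ++ "modelling" :: ["diffusion", "montage_qc"] from rfl,
          walk_split _ _ _ _ (by decide)]
    · rw [A_eq_all, show stage_index_py "diffusion" = 7 from by decide,
          if_neg (by decide),
          show PySem.List.slice pyStages (some 0) (some 7) = ["import", "t1_fit", "input_functions", "time_shift", "segmentation", "tissue_ctc", "modelling"] from by decide]
      unfold job_ready_py_alt
      rw [show pyStages = ["import", "t1_fit", "input_functions", "time_shift", "segmentation", "tissue_ctc", "modelling"] ++ "diffusion" :: ["montage_qc"] from rfl,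
          walk_split _ _ _ _ (by decide)]
    · rw [A_eq_all, show stage_index_py "montage_qc" = 8 from by decide,
          if_neg (by decide),
          show PySem.List.slice pyStages (some 0) (some 8) = ["import", "t1_fit", "input_functions", "time_shift", "segmentation", "tissue_ctc", "modelling", "diffusion"] from by decide]
      unfold job_ready_py_alt
      rw [show pyStages = ["import", "t1_fit", "input_functions", "time_shift", "segmentation", "tissue_ctc", "modelling", "diffusion"] ++ "montage_qc" :: [] from rfl,
          walk_split _ _ _ _ (by decide)]
  · have hidx : stage_index_py sid = 999 := by
      unfold stage_index_py; rw [(PySem.List.index?_eq_none_iff _ _).mpr hmem]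
    rw [A_eq_all, hidx, if_neg (by decide),
        show PySem.List.slice pyStages (some 0) (some 999) = pyStages from by decide]
    unfold job_ready_py_alt
    rw [walk_not_mem _ _ _ hmem]
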